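-- pv_equiv track=rewrite | github.com/ArijitChakr/programming_in_python | Oppe_problems/problems.py | most_occuring_first_letter
-- ===== SOURCE A (Python) =====
-- def most_occuring_first_letter(passage: str) -> str:
--
--     words = passage.lower().split()
--     word_c = {}
--
--     for word in words:
--         first = word[0]
--         if first.isalpha():
--             word_c[first] = word_c.get(first, 0) + 1
--
--     if not word_c:
--         return ""
--
--     # Find the most frequent first letter
--     max_occ = max(word_c, key=word_c.get)
--     return max_occ
-- ===== SOURCE B (Python) =====
-- def most_occuring_first_letter(passage: str) -> str:
--     # single character-level pass with a word-boundary flag: no split(), no count table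
--     letters = []
--     at_start = True
--     for ch in passage.lower():
--         if ch.isspace():
--             at_start = True
--         else:
--             if at_start and ch.isalpha():
--                 letters.append(ch)
--             at_start = False
--     if not letters:
--         return ""
--     return max(dict.fromkeys(letters), key=letters.count)
-- ===== Notes on version B (the rewrite author's own statement) =====
-- stated objective: alternative
-- what changed: Replaces A's split-into-words loop with a dictionary tally by a single character-level scan with a word-boundary flag (no split(), no count table) collecting the word-initial letters, then selecting the max over the first-appearance-ordered distinct letters keyed by list.count, preserving A's first-occurrence tie-break.
import Mathlib
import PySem

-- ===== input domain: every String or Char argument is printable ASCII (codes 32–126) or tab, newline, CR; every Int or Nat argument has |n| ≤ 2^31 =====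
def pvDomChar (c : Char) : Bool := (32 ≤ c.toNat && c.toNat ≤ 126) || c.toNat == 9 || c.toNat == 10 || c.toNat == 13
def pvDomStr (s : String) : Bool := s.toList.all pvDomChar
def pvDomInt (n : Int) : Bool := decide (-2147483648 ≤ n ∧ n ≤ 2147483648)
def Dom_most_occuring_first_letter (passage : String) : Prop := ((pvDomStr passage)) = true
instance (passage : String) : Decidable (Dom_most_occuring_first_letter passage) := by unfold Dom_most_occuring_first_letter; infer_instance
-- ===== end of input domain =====

-- B replaces A's split-into-words + count-dictionary pass by a single character-level
-- scan with a word-boundary flag collecting the word-initial letters, then selects the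
-- answer over the first-appearance-ordered distinct letters keyed by list.count
-- (same value, same first-occurrence tie-break); objective: alternative.

-- ===== PORT A =====
def most_occuring_first_letter (passage : String) : String :=
  let words := PySem.Str.split₀ (PySem.Str.lower passage)
  let word_c := words.foldl (fun d word =>
      match PySem.Str.pyGet? word 0 with
      | some first => if PySem.Chars.isalpha first then d.insert first (d.getD first 0 + 1) else d
      | none => d   -- unreachable: split() yields only nonempty words, so word[0] never raises
    ) (PySem.Dict.empty : PySem.Dict Char Int)
  if word_c.size = 0 then ""
  else
    match PySem.List.max? word_c.keys (fun k => word_c.getD k 0) with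
    | some c => String.ofList [c]
    | none => ""

-- ===== PORT B =====
def most_occuring_first_letter_alt (passage : String) : String :=
  -- for ch in passage.lower(): boundary-flag scan collecting word-initial letters
  let letters := ((PySem.Str.lower passage).toList.foldl
      (fun (st : List Char × Bool) ch =>
        if PySem.Chars.isspace ch then (st.1, true)
        else ((if st.2 && PySem.Chars.isalpha ch then st.1 ++ [ch] else st.1), false))
      ([], true)).1
  if letters = [] then ""
  else
    -- max(dict.fromkeys(letters), key=letters.count)
    match PySem.List.max? (PySem.List.dedup letters) (fun c => (letters.count c : Int)) with
    | some c => String.ofList [c]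
    | none => ""

-- ===== PRECONDITION & SPEC =====
def Spec_most_occuring_first_letter (passage : String) (out : String) : Prop := out = most_occuring_first_letter_alt passage
instance (passage : String) (out : String) : Decidable (Spec_most_occuring_first_letter passage out) := by unfold Spec_most_occuring_first_letter; infer_instance

-- ===== CLAIM (what is proved, stated in full; the proofs are below) =====
def Claim_equal_most_occuring_first_letter : Prop := ∀ (passage : String), Dom_most_occuring_first_letter passage → Spec_most_occuring_first_letter passage (most_occuring_first_letter passage)

-- ===== LEMMAS AND PROOFS =====

-- reference recursion: word-initial alphabetic letters of a char list, given the boundary flag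
def pvLetters : List Char → Bool → List Char
  | [], _ => []
  | c :: t, b =>
    if PySem.Chars.isspace c then pvLetters t true
    else (if b && PySem.Chars.isalpha c then [c] else []) ++ pvLetters t false

-- head letter contributed by the (reversed) current word of split₀.go
def pvCurHead (cur : List Char) : List Char :=
  match cur.getLast? with
  | some c => if PySem.Chars.isalpha c then [c] else []
  | none => []

theorem pv_scan_eq (t : List Char) (ls : List Char) (b : Bool) :
    (t.foldl (fun (st : List Char × Bool) ch =>
        if PySem.Chars.isspace ch then (st.1, true)
        else ((if st.2 && PySem.Chars.isalpha ch then st.1 ++ [ch] else st.1), false))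
      (ls, b)).1 = ls ++ pvLetters t b := by
  induction t generalizing ls b with
  | nil => simp [pvLetters]
  | cons c t ih =>
    simp only [List.foldl]
    by_cases h1 : PySem.Chars.isspace c
    · rw [if_pos h1, ih]
      simp [pvLetters, h1]
    · rw [if_neg h1]
      by_cases h2 : (b && PySem.Chars.isalpha c) = true
      · rw [if_pos h2, ih]
        simp [pvLetters, h1, h2, List.append_assoc]
      · rw [if_neg h2, ih]
        simp [pvLetters, h1, h2]

theorem pv_go_heads (t : List Char) (cur : List Char) (acc : List (List Char)) :
    ((PySem.Chars.split₀.go t cur acc).filterMap List.head?).filter PySem.Chars.isalpha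
    = ((acc.reverse.filterMap List.head?).filter PySem.Chars.isalpha)
      ++ pvCurHead cur ++ pvLetters t cur.isEmpty := by
  induction t generalizing cur acc with
  | nil =>
    simp only [PySem.Chars.split₀.go]
    cases cur with
    | nil => simp [pvCurHead, pvLetters]
    | cons x xs =>
      simp only [List.isEmpty_cons, pvLetters]
      simp [pvCurHead, List.filterMap_append, List.filter_append, List.head?_reverse]
      cases h : xs.getLast? <;> simp [List.getLast?_cons, h, List.filter_cons]
  | cons c t ih =>
    simp only [PySem.Chars.split₀.go]
    by_cases h1 : PySem.Chars.isspace c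
    · rw [if_pos h1]
      cases cur with
      | nil =>
        simp only [List.isEmpty_nil]
        simp [ih, pvCurHead, pvLetters, h1]
      | cons x xs =>
        simp only [List.isEmpty_cons, Bool.false_eq_true, if_false]
        rw [ih]
        simp [pvCurHead, pvLetters, h1, List.filterMap_append, List.filter_append,
          List.head?_reverse]
        cases h : xs.getLast? <;> simp [List.getLast?_cons, h, List.filter_cons]
    · rw [if_neg h1]
      rw [ih]
      cases cur with
      | nil =>
        simp [pvCurHead, pvLetters, h1]
      | cons x xs =>
        simp [pvCurHead, pvLetters, h1, List.getLast?_cons_cons]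

theorem pv_pyGet_zero_eq_head? (w : List Char) : PySem.Chars.pyGet? w 0 = w.head? := by
  cases w <;> simp [PySem.Chars.pyGet?, PySem.List.pyGet?, PySem.List.pyIdx?]

theorem pv_letters_eq (t : List Char) :
    ((PySem.Chars.split₀ t).filterMap (fun w => PySem.Chars.pyGet? w 0)).filter PySem.Chars.isalpha
    = pvLetters t true := by
  have h : ∀ w, PySem.Chars.pyGet? w 0 = List.head? w := pv_pyGet_zero_eq_head?
  simp only [funext h]
  have := pv_go_heads t [] []
  simpa [PySem.Chars.split₀, pvCurHead] using this

theorem pv_ofList_eq_nil_iff {α : Type} [BEq α] [LawfulBEq α] (xs : List α) :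
    PySem.Set.ofList xs = [] ↔ xs = [] := by
  constructor
  · intro h
    cases xs with
    | nil => rfl
    | cons x tl =>
      exfalso
      have hx : x ∈ PySem.Set.ofList (x :: tl) := by
        rw [PySem.Set.mem_ofList]; exact List.mem_cons_self
      rw [h] at hx
      exact (List.not_mem_nil hx)
  · intro h; subst h; rfl

theorem pv_counter_eq (passage : String) :
    (PySem.Str.split₀ (PySem.Str.lower passage)).foldl (fun d word =>
      match PySem.Str.pyGet? word 0 with
      | some first => if PySem.Chars.isalpha first then d.insert first (d.getD first 0 + 1) else d
      | none => d) (PySem.Dict.empty : PySem.Dict Char Int)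
    = PySem.Dict.counter (((PySem.Str.split₀ (PySem.Str.lower passage)).filterMap
        (fun w => PySem.Str.pyGet? w 0)).filter PySem.Chars.isalpha) := by
  rw [← PySem.Dict.foldl_insert_getD_add_one_eq_counter, List.foldl_filter, List.foldl_filterMap]
  congr 1
  funext d w
  cases PySem.Str.pyGet? w 0 <;> rfl

theorem pv_str_letters_eq (passage : String) :
    ((PySem.Str.split₀ (PySem.Str.lower passage)).filterMap
        (fun w => PySem.Str.pyGet? w 0)).filter PySem.Chars.isalpha
    = pvLetters (PySem.Str.lower passage).toList true := by
  rw [← pv_letters_eq (PySem.Str.lower passage).toList]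
  simp [PySem.Str.split₀, PySem.Str.pyGet?, List.filterMap_map, Function.comp]

theorem pv_ab_eq (passage : String) :
    most_occuring_first_letter passage = most_occuring_first_letter_alt passage := by
  unfold most_occuring_first_letter most_occuring_first_letter_alt
  simp only [pv_counter_eq, pv_str_letters_eq, pv_scan_eq, List.nil_append]
  set L := pvLetters (PySem.Str.lower passage).toList true with hL
  have hkeys : (PySem.Dict.counter L).keys = PySem.List.dedup L := by
    rw [PySem.Dict.keys_counter, PySem.List.dedup_eq_ofList]
  have hkey : (fun k => (PySem.Dict.counter L).getD k 0) = (fun c => (L.count c : Int)) := by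
    funext c; exact PySem.Dict.getD_counter L c
  have hsize : ((PySem.Dict.counter L).size = 0) ↔ (L = []) := by
    have h1 : (PySem.Dict.counter L).size = (PySem.Dict.counter L).keys.length := by
      simp [PySem.Dict.size, PySem.Dict.keys]
    rw [h1, hkeys, PySem.List.dedup_eq_ofList, List.length_eq_zero_iff, pv_ofList_eq_nil_iff]
  rw [hkeys, hkey]
  by_cases hnil : L = []
  · rw [if_pos (hsize.mpr hnil), if_pos hnil]
  · rw [if_neg (fun h => hnil (hsize.mp h)), if_neg hnil]

-- ===== VERDICT (by name: the statement is the Claim_ definition above) =====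
theorem most_occuring_first_letter_spec : Claim_equal_most_occuring_first_letter := by
  intro passage _
  exact pv_ab_eq passage
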